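-- pv_equiv track=rewrite | github.com/victorbiikipkoech/Toy-Problem | Consonant value/constant.py | solve
-- ===== SOURCE A (Python) =====
-- def solve(s):
--     vowels = "aeiou"
--     consonant_values = {char: i + 1 for i, char in enumerate("abcdefghijklmnopqrstuvwxyz") if char not in vowels}
--
--     def get_consonant_value(substring):
--         return sum(consonant_values[char] for char in substring)
--
--     max_value = 0
--     current_consonant = ""
--
--     for char in s:
--         if char not in vowels:
--             current_consonant += char
--         else:
--             if current_consonant:
--                 current_value = get_consonant_value(current_consonant)
--                 max_value = max(max_value, current_value)
--                 current_consonant = ""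
--
--     if current_consonant:
--         current_value = get_consonant_value(current_consonant)
--         max_value = max(max_value, current_value)
--
--     return max_value
-- ===== SOURCE B (Python) =====
-- def solve(s):
--     vowels = "aeiou"
--     consonant_values = {char: i + 1 for i, char in enumerate("abcdefghijklmnopqrstuvwxyz") if char not in vowels}
--
--     # Pass 1: cumulative-value table; prefix[i] = total value of the first i characters
--     # (vowels contribute 0; a non-letter raises KeyError exactly as in the original).
--     prefix = [0]
--     for ch in s:
--         prefix.append(prefix[-1] + (0 if ch in vowels else consonant_values[ch]))
--
--     # Pass 2: boundary indices — a virtual vowel before the string, every vowel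
--     # position, and a virtual vowel past the end.
--     boundaries = [-1] + [i for i, ch in enumerate(s) if ch in vowels] + [len(s)]
--
--     # Pass 3: each maximal consonant run lies strictly between two consecutive
--     # boundaries; its value is a difference of two prefix sums.
--     best = 0
--     for a, b in zip(boundaries, boundaries[1:]):
--         best = max(best, prefix[b] - prefix[a + 1])
--     return best
-- ===== Notes on version B (the rewrite author's own statement) =====
-- stated objective: alternative
-- what changed: A scans once, growing the current consonant run and folding a running max; B uses a prefix-sum table: it builds cumulative per-character values, collects the vowel boundary indices (with virtual boundaries -1 and len(s)), and obtains each run's value as a difference of two prefix sums, maximizing over consecutive boundary pairs.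
import Mathlib
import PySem

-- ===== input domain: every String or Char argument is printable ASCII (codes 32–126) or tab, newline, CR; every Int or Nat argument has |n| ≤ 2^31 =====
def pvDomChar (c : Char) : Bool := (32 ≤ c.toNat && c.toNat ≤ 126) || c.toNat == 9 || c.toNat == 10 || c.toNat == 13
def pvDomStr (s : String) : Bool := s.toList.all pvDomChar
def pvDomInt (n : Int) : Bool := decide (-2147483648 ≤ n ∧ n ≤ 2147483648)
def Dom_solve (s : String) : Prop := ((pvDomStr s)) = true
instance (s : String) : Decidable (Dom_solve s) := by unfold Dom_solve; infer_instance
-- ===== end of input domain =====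

-- B replaces A's fused run-tracking/running-max scan by a prefix-sum algorithm:
-- cumulative character values plus vowel boundary indices, each run's value read off
-- as a difference of two prefix sums (objective: alternative; same cost).

-- ===== PORT A =====
-- shared by both ports (both Pythons build the identical dict)
def pvVowels : List Char := "aeiou".toList

def pvConsDict : PySem.Dict Char Int :=
  (PySem.List.enumerate "abcdefghijklmnopqrstuvwxyz".toList).foldl
    (fun d p => if pvVowels.contains p.2 then d else d.insert p.2 (p.1 + 1))
    PySem.Dict.empty

-- get_consonant_value: consonant_values[char] raises KeyError on chars outside the dict;
-- those inputs are excluded by Pre_solve, so the total getD-0 form is exact there.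
def pvGetConsVal (sub : List Char) : Int :=
  (sub.map (fun c => (pvConsDict.get? c).getD 0)).sum

def pvStepA (st : Int × List Char) (c : Char) : Int × List Char :=
  if ¬ pvVowels.contains c then (st.1, st.2 ++ [c])
  else if st.2 ≠ [] then (max st.1 (pvGetConsVal st.2), ([] : List Char)) else st

def solve (s : String) : Int :=
  let fin := s.toList.foldl pvStepA (0, ([] : List Char))
  if fin.2 ≠ [] then max fin.1 (pvGetConsVal fin.2) else fin.1

-- ===== PORT B =====
-- '0 if ch in vowels else consonant_values[ch]': the KeyError branch is outside
-- Pre_solve, so getD 0 is exact there.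
def pvValB (c : Char) : Int :=
  if pvVowels.contains c then 0 else (pvConsDict.get? c).getD 0

-- prefix.append(prefix[-1] + …): the list starts as [0] and only grows, so prefix[-1]
-- (pyGetD at -1) never raises.
def pvStepPref (pr : List Int) (c : Char) : List Int :=
  pr ++ [PySem.List.pyGetD pr (-1) 0 + pvValB c]

def solve_alt (s : String) : Int :=
  let pref := s.toList.foldl pvStepPref [(0 : Int)]
  let boundaries : List Int :=
    (-1) :: ((PySem.List.enumerate s.toList).filterMap
      (fun p => if pvVowels.contains p.2 then some p.1 else none)) ++ [(s.toList.length : Int)]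
  -- zip(boundaries, boundaries[1:]); prefix[b] and prefix[a+1] are always in range
  -- (boundary indices lie in [-1, len(s)]), so the pyGetD 0 total form is exact.
  (boundaries.zip (PySem.List.slice boundaries (some 1) none)).foldl
    (fun m p => max m (PySem.List.pyGetD pref p.2 0 - PySem.List.pyGetD pref (p.1 + 1) 0)) 0

-- ===== PRECONDITION & SPEC =====
-- Python A raises KeyError on any character that is not a lowercase letter a–z (every
-- non-vowel character is looked up in consonant_values); Pre_ admits exactly the inputs
-- on which A returns.
def Pre_solve (s : String) : Prop := (s.toList.all (fun c => 97 ≤ c.toNat && c.toNat ≤ 122)) = true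
instance (s : String) : Decidable (Pre_solve s) := by unfold Pre_solve; infer_instance
def pvWitness_solve : String := "bc"

def Spec_solve (s : String) (out : Int) : Prop := out = solve_alt s
instance (s : String) (out : Int) : Decidable (Spec_solve s out) := by unfold Spec_solve; infer_instance

-- ===== CLAIM (what is proved, stated in full; the proofs are below) =====
def Claim_equal_solve : Prop := ∀ (s : String), Dom_solve s → Pre_solve s → Spec_solve s (solve s)

-- ===== LEMMAS AND PROOFS =====

-- the list of maximal consonant runs (split at vowels, keeping empty runs), proof-side view
def pvSplit : List Char → List (List Char)
  | [] => [[]]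
  | c :: l =>
    if pvVowels.contains c then [] :: pvSplit l
    else match pvSplit l with
      | [] => [[c]]
      | g :: gs => (c :: g) :: gs

def pvConsFirst (cur : List Char) : List (List Char) → List (List Char)
  | [] => [cur]
  | g :: gs => (cur ++ g) :: gs

lemma pvSplit_ne_nil (l : List Char) : pvSplit l ≠ [] := by
  cases l with
  | nil => simp [pvSplit]
  | cons c t =>
    simp only [pvSplit]
    split
    · simp
    · cases h : pvSplit t <;> simp

lemma pvGetConsVal_nil : pvGetConsVal [] = 0 := rfl

-- A's loop + final flush computes the running max over the consonant runs of l,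
-- with the pending run cur prefixed to the first run.
lemma pvA_loop (l : List Char) : ∀ (m : Int) (cur : List Char), 0 ≤ m →
    (let fin := l.foldl pvStepA (m, cur);
     if fin.2 ≠ [] then max fin.1 (pvGetConsVal fin.2) else fin.1)
    = ((pvConsFirst cur (pvSplit l)).map pvGetConsVal).foldl max m := by
  induction l with
  | nil =>
    intro m cur hm
    simp only [List.foldl_nil, pvSplit, pvConsFirst, List.map_cons, List.map_nil,
      List.foldl_cons, List.foldl_nil]
    by_cases h : cur = []
    · subst h; simp [pvGetConsVal_nil, max_eq_left hm]
    · simp [h]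
  | cons c t ih =>
    intro m cur hm
    by_cases hv : c ∈ pvVowels
    · have hstep : pvStepA (m, cur) c = (max m (pvGetConsVal cur), ([] : List Char)) := by
        by_cases h : cur = []
        · subst h; simp [pvStepA, hv, pvGetConsVal_nil, max_eq_left hm]
        · simp [pvStepA, hv, h]
      simp only [List.foldl_cons, hstep]
      rw [ih (max m (pvGetConsVal cur)) [] (le_trans hm (le_max_left _ _))]
      have hsplit : pvSplit (c :: t) = [] :: pvSplit t := by simp [pvSplit, hv]
      rw [hsplit]
      cases hs : pvSplit t with
      | nil => exact absurd hs (pvSplit_ne_nil t)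
      | cons g gs =>
        simp [pvConsFirst, List.foldl_cons]
    · have hstep : pvStepA (m, cur) c = (m, cur ++ [c]) := by simp [pvStepA, hv]
      simp only [List.foldl_cons, hstep]
      rw [ih m (cur ++ [c]) hm]
      have hsplit : pvSplit (c :: t)
          = match pvSplit t with | [] => [[c]] | g :: gs => (c :: g) :: gs := by
        simp [pvSplit, hv]
      rw [hsplit]
      cases hs : pvSplit t with
      | nil => exact absurd hs (pvSplit_ne_nil t)
      | cons g gs =>
        simp [pvConsFirst, List.append_assoc]

-- ===== B side =====

-- the prefix-sum table, proof-side view: pvPre x l = [x, x+v(l0), x+v(l0)+v(l1), …]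
def pvPre (x : Int) : List Char → List Int
  | [] => [x]
  | c :: t => x :: pvPre (x + pvValB c) t

-- B's prefix-building loop computes pvPre
lemma pvB_pref (l : List Char) : ∀ (xs : List Int) (x : Int),
    l.foldl pvStepPref (xs ++ [x]) = xs ++ pvPre x l := by
  induction l with
  | nil => intro xs x; simp [pvPre]
  | cons c t ih =>
    intro xs x
    have hstep : pvStepPref (xs ++ [x]) c = (xs ++ [x]) ++ [x + pvValB c] := by
      simp [pvStepPref, PySem.List.pyGetD_neg_one_append_singleton]
    simp only [List.foldl_cons, hstep]
    rw [ih (xs ++ [x]) (x + pvValB c)]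
    simp [pvPre]

-- the vowel positions, proof-side view (as Nats, built structurally)
def pvVIdx : List Char → List Nat
  | [] => []
  | c :: t => if pvVowels.contains c then 0 :: (pvVIdx t).map (· + 1)
              else (pvVIdx t).map (· + 1)

lemma pvB_vidx (l : List Char) : ∀ (st : Int),
    (PySem.List.enumerate l st).filterMap
      (fun p => if pvVowels.contains p.2 then some p.1 else none)
    = (pvVIdx l).map (fun k : Nat => st + (k : Int)) := by
  induction l with
  | nil => intro st; simp [PySem.List.enumerate_nil, pvVIdx]
  | cons c t ih =>
    intro st
    rw [PySem.List.enumerate_cons, List.filterMap_cons, ih (st + 1)]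
    by_cases hv : pvVowels.contains c
    · simp only [hv, if_pos, pvVIdx, List.map_cons, List.map_map]
      congr 1
      · simp
      · apply List.map_congr_left; intro k _; simp [Function.comp]; ring
    · simp only [hv, pvVIdx, Bool.false_eq_true, if_false, List.map_map]
      apply List.map_congr_left; intro k _; simp [Function.comp]; ring

-- shifting a cons past a nonnegative index
lemma pvGetD_cons_succ (y : Int) (ys : List Int) (i : Int) (hi : 0 ≤ i) :
    PySem.List.pyGetD (y :: ys) (i + 1) 0 = PySem.List.pyGetD ys i 0 := by
  obtain ⟨k, rfl⟩ := Int.eq_ofNat_of_zero_le hi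
  have : ((k : Int) + 1) = ((k + 1 : Nat) : Int) := by push_cast; ring
  rw [this, PySem.List.pyGetD_natCast, PySem.List.pyGetD_natCast]
  rfl

lemma pvPre_head (x : Int) (l : List Char) :
    PySem.List.pyGetD (pvPre x l) 0 0 = x := by
  cases l <;> simp [pvPre, PySem.List.pyGetD_zero_cons]

-- cast-shift helper for boundary lists
lemma pvCastShift (xs : List Nat) :
    (xs.map (· + 1)).map (fun k : Nat => (k : Int))
    = (xs.map (fun k : Nat => (k : Int))).map (· + 1) := by
  simp only [List.map_map]
  apply List.map_congr_left
  intro k _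
  simp [Function.comp]

-- the boundary list of l (tail part: vowel indices then the virtual end boundary)
def pvBTail (l : List Char) : List Int :=
  (pvVIdx l).map (fun k : Nat => (k : Int)) ++ [(l.length : Int)]

lemma pvBTail_ne_nil (l : List Char) : pvBTail l ≠ [] := by simp [pvBTail]

lemma pvBTail_nonneg (l : List Char) : ∀ y ∈ pvBTail l, 0 ≤ y := by
  intro y hy
  rcases List.mem_append.1 hy with h | h
  · rcases List.mem_map.1 h with ⟨k, _, rfl⟩; omega
  · simp only [List.mem_singleton] at h; subst h; omega

-- the per-pair value B computes, as a function of the prefix table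
def pvDiff (P : List Int) (p : Int × Int) : Int :=
  PySem.List.pyGetD P p.2 0 - PySem.List.pyGetD P (p.1 + 1) 0

def pvRunSum (g : List Char) : Int := (g.map pvValB).sum

lemma pvVIdx_cons_vowel (c : Char) (t : List Char) (hv : pvVowels.contains c) :
    pvBTail (c :: t) = 0 :: (pvBTail t).map (· + 1) := by
  simp only [pvBTail, pvVIdx, hv, if_pos, List.map_cons, List.map_append, List.cons_append,
    List.length_cons, pvCastShift]
  push_cast
  simp

lemma pvVIdx_cons_cons (c : Char) (t : List Char) (hv : ¬ pvVowels.contains c) :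
    pvBTail (c :: t) = (pvBTail t).map (· + 1) := by
  simp only [pvBTail, pvVIdx, hv, Bool.false_eq_true, if_neg, not_false_iff, List.map_append,
    List.length_cons, pvCastShift]
  push_cast
  simp

-- MAIN: the per-pair prefix differences over consecutive boundaries are the run sums
lemma pvB_main (l : List Char) : ∀ (x : Int),
    (((-1 : Int) :: pvBTail l).zip (pvBTail l)).map (pvDiff (pvPre x l))
    = (pvSplit l).map pvRunSum := by
  induction l with
  | nil =>
    intro x
    simp [pvBTail, pvVIdx, pvSplit, pvDiff, pvRunSum, pvPre, PySem.List.pyGetD_zero_cons]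
  | cons c t ih =>
    intro x
    by_cases hv : pvVowels.contains c
    · -- vowel: a boundary 0 is inserted, the character contributes 0 to the prefix sums
      have hval : pvValB c = 0 := by unfold pvValB; rw [if_pos hv]
      have hP : pvPre x (c :: t) = x :: pvPre x t := by simp [pvPre, hval]
      rw [pvVIdx_cons_vowel c t hv, hP]
      have hsplit : pvSplit (c :: t) = [] :: pvSplit t := by
        simp only [pvSplit]; rw [if_pos hv]
      rw [hsplit]
      have hshift : ((0 : Int) :: (pvBTail t).map (· + 1))
          = ((-1 : Int) :: pvBTail t).map (· + 1) := by simp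
      rw [List.zip_cons_cons, List.map_cons, hshift, List.zip_map, List.map_map]
      have hhead : pvDiff (x :: pvPre x t) (-1, 0) = pvRunSum [] := by
        simp [pvDiff, pvRunSum, PySem.List.pyGetD_zero_cons]
      have htail : (List.map (pvDiff (x :: pvPre x t) ∘ Prod.map (· + 1) (· + 1))
            (((-1 : Int) :: pvBTail t).zip (pvBTail t)))
          = (pvSplit t).map pvRunSum := by
        rw [← ih x]
        apply List.map_congr_left
        intro p hp
        obtain ⟨hp1, hp2⟩ := List.of_mem_zip hp
        obtain ⟨a, b⟩ := p
        have h1 : (0 : Int) ≤ a + 1 := by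
          rcases List.mem_cons.1 hp1 with h | h
          · simp at h; omega
          · have := pvBTail_nonneg t _ h; omega
        have h2 : (0 : Int) ≤ b := pvBTail_nonneg t _ hp2
        simp only [Function.comp_apply, Prod.map_apply, pvDiff]
        rw [pvGetD_cons_succ _ _ _ h2, pvGetD_cons_succ _ _ _ h1]
      rw [List.map_cons, hhead, htail]
    · -- consonant: every boundary shifts by one, the head run gains c
      have hP : pvPre x (c :: t) = x :: pvPre (x + pvValB c) t := by simp [pvPre]
      rw [pvVIdx_cons_cons c t hv, hP]
      have hsplit : pvSplit (c :: t)
          = match pvSplit t with | [] => [[c]] | g :: gs => (c :: g) :: gs := by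
        simp only [pvSplit]; rw [if_neg hv]
      cases hs : pvSplit t with
      | nil => exact absurd hs (pvSplit_ne_nil t)
      | cons g gs =>
        rw [hsplit, hs]
        cases hbt : pvBTail t with
        | nil => exact absurd hbt (pvBTail_ne_nil t)
        | cons b1 bt' =>
          have ihx := ih (x + pvValB c)
          rw [hbt, hs, List.zip_cons_cons, List.map_cons, List.map_cons] at ihx
          obtain ⟨hb1, hrest⟩ := List.cons_eq_cons.1 ihx
          have hb1' : PySem.List.pyGetD (pvPre (x + pvValB c) t) b1 0
              = pvRunSum g + (x + pvValB c) := by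
            have h0 := pvPre_head (x + pvValB c) t
            simp only [pvDiff] at hb1
            norm_num at hb1
            omega
          have hb1nn : (0 : Int) ≤ b1 :=
            pvBTail_nonneg t b1 (by rw [hbt]; exact List.mem_cons_self ..)
          rw [List.map_cons, List.zip_cons_cons, List.map_cons]
          have hhead : pvDiff (x :: pvPre (x + pvValB c) t) (-1, b1 + 1)
              = pvRunSum (c :: g) := by
            simp only [pvDiff, pvRunSum, List.map_cons, List.sum_cons]
            rw [pvGetD_cons_succ _ _ _ hb1nn]
            rw [show (-1 : Int) + 1 = 0 from by omega, PySem.List.pyGetD_zero_cons, hb1']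
            simp only [pvRunSum] at *
            ring
          have htail : (((b1 + 1) :: bt'.map (· + 1)).zip (bt'.map (· + 1))).map
                (pvDiff (x :: pvPre (x + pvValB c) t))
              = gs.map pvRunSum := by
            rw [show ((b1 + 1) :: bt'.map (· + 1)) = (b1 :: bt').map (· + 1) from by simp,
              List.zip_map, List.map_map, ← hrest]
            apply List.map_congr_left
            intro p hp
            obtain ⟨hp1, hp2⟩ := List.of_mem_zip hp
            obtain ⟨a, b⟩ := p
            have h1 : (0 : Int) ≤ a :=
              pvBTail_nonneg t a (by rw [hbt]; exact hp1)
            have h2 : (0 : Int) ≤ b :=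
              pvBTail_nonneg t b (by rw [hbt]; exact List.mem_cons_of_mem _ hp2)
            simp only [Function.comp_apply, Prod.map_apply, pvDiff]
            rw [pvGetD_cons_succ _ _ _ h2, pvGetD_cons_succ _ _ _ (by omega : (0:Int) ≤ a + 1)]
          rw [hhead, htail]
          simp

-- runs contain no vowels, so pvValB agrees with A's dict lookup on them
lemma pvSplit_no_vowel (l : List Char) :
    ∀ g ∈ pvSplit l, ∀ c ∈ g, ¬ pvVowels.contains c := by
  induction l with
  | nil => intro g hg c hc; simp [pvSplit] at hg; subst hg; simp at hc
  | cons d t ih =>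
    intro g hg c hc
    by_cases hv : pvVowels.contains d
    · simp only [pvSplit, hv, if_pos] at hg
      rcases List.mem_cons.1 hg with h | h
      · subst h; simp at hc
      · exact ih g h c hc
    · simp only [pvSplit, hv, if_neg, Bool.false_eq_true, not_false_iff] at hg
      cases hs : pvSplit t with
      | nil => exact absurd hs (pvSplit_ne_nil t)
      | cons g0 gs =>
        rw [hs] at hg
        rcases List.mem_cons.1 hg with h | h
        · subst h
          rcases List.mem_cons.1 hc with h' | h'
          · subst h'; exact hv
          · exact ih g0 (hs ▸ List.mem_cons_self ..) c h'
        · exact ih g (hs ▸ List.mem_cons_of_mem _ h) c hc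

lemma pvRunSum_eq (l : List Char) :
    (pvSplit l).map pvRunSum = (pvSplit l).map pvGetConsVal := by
  apply List.map_congr_left
  intro g hg
  unfold pvRunSum pvGetConsVal
  congr 1
  apply List.map_congr_left
  intro c hc
  unfold pvValB
  rw [if_neg (pvSplit_no_vowel l g hg c hc)]

-- ===== VERDICT (by name: the statement is the Claim_ definition above) =====
theorem solve_spec : Claim_equal_solve := by
  unfold Claim_equal_solve
  intro s _ _
  unfold Spec_solve solve solve_alt
  rw [pvA_loop s.toList 0 [] le_rfl]
  have hpref : s.toList.foldl pvStepPref [(0 : Int)] = pvPre 0 s.toList := by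
    simpa using pvB_pref s.toList [] 0
  have hbnd : (((-1 : Int) :: (PySem.List.enumerate s.toList).filterMap
        (fun p => if pvVowels.contains p.2 then some p.1 else none))
        ++ [(s.toList.length : Int)]) = (-1 : Int) :: pvBTail s.toList := by
    rw [List.cons_append]
    congr 1
    rw [pvB_vidx s.toList 0]
    unfold pvBTail
    congr 1
    apply List.map_congr_left
    intro k _
    omega
  simp only [hpref, hbnd, PySem.List.slice_from_one, List.tail_cons]
  have hfold : ∀ (P : List Int) (ps : List (Int × Int)),
      ps.foldl (fun m p => max m
        (PySem.List.pyGetD P p.2 0 - PySem.List.pyGetD P (p.1 + 1) 0)) 0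
      = (ps.map (pvDiff P)).foldl max 0 := by
    intro P ps
    rw [List.foldl_map]
    rfl
  rw [hfold, pvB_main, pvRunSum_eq]
  cases hs : pvSplit s.toList with
  | nil => exact absurd hs (pvSplit_ne_nil s.toList)
  | cons g gs => simp [pvConsFirst]
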